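-- pv_equiv track=rewrite | github.com/Sigumaa/Excellm | src/excelmd/parser/ooxml.py | _strip_quoted
-- ===== SOURCE A (Python) =====
-- def _strip_quoted(fmt: str) -> str:
--     out: list[str] = []
--     in_quote = False
--     for ch in fmt:
--         if ch == '"':
--             in_quote = not in_quote
--             continue
--         if not in_quote:
--             out.append(ch)
--     return "".join(out)
-- ===== SOURCE B (Python) =====
-- def _strip_quoted(fmt: str) -> str:
--     return "".join(fmt.split('"')[::2])
-- ===== Notes on version B (the rewrite author's own statement) =====
-- stated objective: faster
-- what changed: Replaces the per-character quote-toggle state machine with splitting on the double-quote delimiter and joining the even-indexed (outside-quote) segments.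
import Mathlib
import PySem

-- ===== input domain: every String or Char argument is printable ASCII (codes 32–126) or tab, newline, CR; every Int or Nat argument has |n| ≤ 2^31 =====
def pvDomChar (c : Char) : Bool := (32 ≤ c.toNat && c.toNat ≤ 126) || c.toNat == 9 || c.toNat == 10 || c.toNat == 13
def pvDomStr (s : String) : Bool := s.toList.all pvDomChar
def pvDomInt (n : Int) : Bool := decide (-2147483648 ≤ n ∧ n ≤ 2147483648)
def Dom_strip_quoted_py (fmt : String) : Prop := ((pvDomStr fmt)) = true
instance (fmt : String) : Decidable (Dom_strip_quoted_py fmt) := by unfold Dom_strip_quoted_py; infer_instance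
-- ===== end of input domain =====

-- B replaces A's per-character quote-toggle state machine by splitting on '"' and
-- joining the even-indexed (outside-quote) segments; same behaviour, more idiomatic.


-- ===== PORT A =====
-- the for-loop over fmt's characters with the `out` accumulator and the `in_quote` flag
def stripALoop : List Char → Bool → List Char → List Char
  | [], _, out => out
  | c :: rest, in_quote, out =>
      if c = '"' then stripALoop rest (!in_quote) out
      else if !in_quote then stripALoop rest in_quote (out ++ [c])
      else stripALoop rest in_quote out

def strip_quoted_py (fmt : String) : String :=
  -- out = []; in_quote = False; for ch in fmt: …; return "".join(out)
  String.ofList (stripALoop fmt.toList false [])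

-- ===== PORT B =====
def strip_quoted_py_alt (fmt : String) : String :=
  -- return "".join(fmt.split('"')[::2])
  match PySem.List.slice? (PySem.Chars.splitOn fmt.toList ['"']) none none 2 with
  | some evens => String.ofList (PySem.Chars.join [] evens)
  | none => ""   -- unreachable: the step literal 2 is nonzero, slice? never returns none

-- ===== PRECONDITION & SPEC =====
def Spec_strip_quoted_py (fmt : String) (out : String) : Prop := out = strip_quoted_py_alt fmt
instance (fmt : String) (out : String) : Decidable (Spec_strip_quoted_py fmt out) := by unfold Spec_strip_quoted_py; infer_instance

-- ===== CLAIM (what is proved, stated in full; the proofs are below) =====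
def Claim_equal_strip_quoted_py : Prop := ∀ (fmt : String), Dom_strip_quoted_py fmt → Spec_strip_quoted_py fmt (strip_quoted_py fmt)

-- ===== LEMMAS AND PROOFS =====

-- reference splitter: split a char list on '"', `pre` the (reversed-free) current segment
def mySplit (pre : List Char) : List Char → List (List Char)
  | [] => [pre]
  | c :: rest => if c = '"' then pre :: mySplit [] rest else mySplit (pre ++ [c]) rest

-- even-indexed elements of a list
def evensOf {α : Type} : List α → List α
  | [] => []
  | [x] => [x]
  | x :: _ :: r => x :: evensOf r

-- keep/drop alternation: `sel false` keeps a segment then drops the next, …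
def sel {α : Type} : Bool → List (List α) → List α
  | _, [] => []
  | false, p :: ps => p ++ sel true ps
  | true, _ :: ps => sel false ps

theorem splitOn_go_spec (fuel : ℕ) (l cur : List Char) (acc : List (List Char))
    (h : l.length < fuel) :
    PySem.Chars.splitOn.go ['"'] fuel l cur acc = acc.reverse ++ mySplit cur.reverse l := by
  induction fuel generalizing l cur acc with
  | zero => omega
  | succ fuel ih =>
    cases l with
    | nil => simp [PySem.Chars.splitOn.go, mySplit]
    | cons c rest =>
      by_cases hc : c = '"'
      · subst hc
        have hp : List.isPrefixOf ['"'] ('"' :: rest) = true := by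
          simp [List.isPrefixOf]
        simp only [PySem.Chars.splitOn.go, hp, if_pos]
        have hdrop : List.drop (['"'] : List Char).length ('"' :: rest) = rest := rfl
        rw [hdrop, ih rest [] (cur.reverse :: acc) (by simp at h ⊢; omega)]
        simp [mySplit]
      · have hp : List.isPrefixOf ['"'] (c :: rest) = false := by
          simp only [List.isPrefixOf]
          simp
          exact fun hh => hc hh.symm
        simp only [PySem.Chars.splitOn.go, hp, Bool.false_eq_true, if_false]
        rw [ih rest (c :: cur) acc (by simp at h ⊢; omega)]
        simp [mySplit, hc]

theorem splitOn_eq_mySplit (l : List Char) :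
    PySem.Chars.splitOn l ['"'] = mySplit [] l := by
  unfold PySem.Chars.splitOn
  rw [splitOn_go_spec (l.length + 1) l [] [] (by omega)]
  simp

theorem filterMap_evens {α : Type} (xs : List α) :
    List.filterMap (fun k => xs[2 * k]?) (List.range ((xs.length + 1) / 2)) = evensOf xs := by
  induction xs using evensOf.induct with
  | case1 => simp [evensOf]
  | case2 x => simp [evensOf]
  | case3 x y r ih =>
    have hlen : ((x :: y :: r).length + 1) / 2 = (r.length + 1) / 2 + 1 := by
      simp; omega
    rw [hlen, List.range_succ_eq_map, List.filterMap_cons, List.filterMap_map]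
    simp only [Nat.mul_zero, List.getElem?_cons_zero, evensOf]
    refine congrArg (List.cons x) ?_
    rw [← ih]
    apply List.filterMap_congr
    intro k _
    have : 2 * Nat.succ k = 2 * k + 1 + 1 := by omega
    simp [this, Function.comp]

theorem slice?_two {α : Type} (xs : List α) :
    PySem.List.slice? xs none none 2 = some (evensOf xs) := by
  have h2 : (2 : ℤ) ≠ 0 := by norm_num
  simp only [PySem.List.slice?, PySem.List.sliceIndices, h2, if_false]
  norm_num
  have hcount : (if 0 < xs.length then (((xs.length : ℤ) + 2 - 1) / 2).toNat else 0)
      = (xs.length + 1) / 2 := by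
    split_ifs with h
    · omega
    · omega
  rw [hcount, ← filterMap_evens]
  apply List.filterMap_congr
  intro k _
  have h3 : ((2 : ℤ) * (k : ℤ)).toNat = 2 * k := by omega
  simp [h3]

theorem join_nil_flatten (ps : List (List Char)) :
    PySem.Chars.join [] ps = ps.flatten := by
  unfold PySem.Chars.join
  induction ps with
  | nil => simp [List.intercalate]
  | cons p ps ih =>
    cases ps with
    | nil => simp [List.intercalate]
    | cons q qs =>
      simp only [List.intercalate, List.intersperse] at ih ⊢
      simp_all

theorem evensOf_flatten_eq_sel (ps : List (List Char)) :
    (evensOf ps).flatten = sel false ps := by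
  induction ps using evensOf.induct with
  | case1 => simp [evensOf, sel]
  | case2 x => simp [evensOf, sel]
  | case3 x y r ih => simp [evensOf, sel, ih]

theorem stripALoop_acc (l : List Char) (inq : Bool) (acc : List Char) :
    stripALoop l inq acc = acc ++ stripALoop l inq [] := by
  induction l generalizing inq acc with
  | nil => simp [stripALoop]
  | cons c rest ih =>
    by_cases hc : c = '"'
    · simp only [stripALoop, if_pos hc]
      exact ih (!inq) acc
    · cases inq with
      | false =>
        simp only [stripALoop, if_neg hc, Bool.not_false, if_pos]
        rw [ih false (acc ++ [c]), ih false ([] ++ [c])]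
        simp
      | true =>
        simp only [stripALoop, if_neg hc, Bool.not_true, Bool.false_eq_true, if_false]
        exact ih true acc

theorem sel_mySplit (l : List Char) : ∀ pre : List Char,
    sel false (mySplit pre l) = pre ++ stripALoop l false [] ∧
    sel true (mySplit pre l) = stripALoop l true [] := by
  induction l with
  | nil => intro pre; simp [mySplit, sel, stripALoop]
  | cons c rest ih =>
    intro pre
    by_cases hc : c = '"'
    · subst hc
      have hsplit : mySplit pre ('"' :: rest) = pre :: mySplit [] rest := by
        simp [mySplit]
      have hf : stripALoop ('"' :: rest) false [] = stripALoop rest true [] := by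
        simp [stripALoop]
      have ht : stripALoop ('"' :: rest) true [] = stripALoop rest false [] := by
        simp [stripALoop]
      rw [hsplit, hf, ht]
      refine ⟨?_, ?_⟩
      · simp only [sel]; rw [(ih []).2]
      · simp only [sel]; rw [(ih []).1]; simp
    · have hsplit : mySplit pre (c :: rest) = mySplit (pre ++ [c]) rest := by
        simp [mySplit, hc]
      have hf : stripALoop (c :: rest) false [] = stripALoop rest false [c] := by
        simp [stripALoop, hc]
      have ht : stripALoop (c :: rest) true [] = stripALoop rest true [] := by
        simp [stripALoop, hc]
      rw [hsplit, hf, ht]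
      refine ⟨?_, (ih (pre ++ [c])).2⟩
      rw [(ih (pre ++ [c])).1, stripALoop_acc rest false [c]]
      simp

-- ===== VERDICT (by name: the statement is the Claim_ definition above) =====
theorem strip_quoted_py_spec : Claim_equal_strip_quoted_py := by
  intro fmt _
  unfold Spec_strip_quoted_py strip_quoted_py strip_quoted_py_alt
  rw [splitOn_eq_mySplit, slice?_two]
  simp only
  rw [join_nil_flatten, evensOf_flatten_eq_sel]
  rw [(sel_mySplit fmt.toList []).1]
  simp
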